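-- pv_equiv track=rewrite | github.com/thepractiseground/the-practise-ground | scripts/fix-qa-issues-part4-enrichments.py | pick_verb
-- ===== SOURCE A (Python) =====
-- THEOREM_WORDS = ('theorem', 'law', 'principle', 'rule', 'postulate', 'axiom', 'equation')
--
-- PROCESS_WORDS = ('reaction', 'synthesis', 'preparation', 'process', 'cycle', 'pathway',
--                  'replication', 'transcription', 'translation', 'respiration',
--                  'photosynthesis', 'digestion', 'circulation', 'excretion',
--                  'fermentation', 'hydrolysis', 'metabolism', 'mitosis', 'meiosis')
--
-- QUANTITY_WORDS = ('velocity', 'acceleration', 'momentum', 'force', 'energy', 'power',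
--                   'pressure', 'temperature', 'frequency', 'wavelength', 'amplitude',
--                   'resistance', 'current', 'voltage', 'capacitance', 'inductance',
--                   'radius', 'volume', 'mass', 'weight', 'density', 'enthalpy',
--                   'entropy', 'concentration', 'molarity', 'ph', 'constant',
--                   'rate', 'efficiency', 'ratio', 'proportion', 'factor')
--
-- ENTITY_WORDS = ('cell', 'tissue', 'organ', 'organism', 'molecule', 'atom', 'ion',
--                 'compound', 'element', 'bond', 'hormone', 'enzyme', 'protein',
--                 'nucleic', 'vitamin', 'bacteria', 'virus', 'fungi', 'algae',
--                 'family', 'group', 'kingdom', 'species', 'genus', 'metal', 'nonmetal')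
--
-- STRUCTURE_WORDS = ('structure', 'anatomy', 'morphology', 'configuration', 'shape',
--                    'geometry', 'isomerism', 'stereochemistry')
--
-- CLASSIFY_WORDS = ('classification', 'types', 'kinds', 'categories', 'varieties')
--
-- SUBJECT_VERBS = {
--     'physics':      ['analyse', 'derive', 'calculate', 'explain', 'apply'],
--     'chemistry':    ['identify', 'explain', 'predict', 'write', 'apply'],
--     'biology':      ['describe', 'identify', 'compare', 'explain', 'diagram'],
--     'maths-higher': ['prove', 'solve', 'evaluate', 'apply', 'verify'],
-- }
--
-- def pick_verb(sub: str, subject: str, idx: int) -> str: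
--     """Choose a grammatical verb for the given subtopic."""
--     s = sub.lower()
--     if any(w in s for w in THEOREM_WORDS):
--         return 'state and apply' if subject != 'biology' else 'state'
--     if any(w in s for w in PROCESS_WORDS):
--         return 'describe' if subject == 'biology' else 'explain'
--     if any(w in s for w in QUANTITY_WORDS):
--         return 'calculate' if subject in ('physics', 'chemistry') else 'evaluate'
--     if any(w in s for w in ENTITY_WORDS):
--         return 'identify'
--     if any(w in s for w in STRUCTURE_WORDS):
--         return 'draw and explain' if subject == 'biology' else 'describe'
--     if any(w in s for w in CLASSIFY_WORDS):
--         return 'classify'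
--     # Fall back to cycling through subject verbs
--     return SUBJECT_VERBS[subject][idx % len(SUBJECT_VERBS[subject])]
-- ===== SOURCE B (Python) =====
-- THEOREM_WORDS = ('theorem', 'law', 'principle', 'rule', 'postulate', 'axiom', 'equation')
--
-- PROCESS_WORDS = ('reaction', 'synthesis', 'preparation', 'process', 'cycle', 'pathway',
--                  'replication', 'transcription', 'translation', 'respiration',
--                  'photosynthesis', 'digestion', 'circulation', 'excretion',
--                  'fermentation', 'hydrolysis', 'metabolism', 'mitosis', 'meiosis')
--
-- QUANTITY_WORDS = ('velocity', 'acceleration', 'momentum', 'force', 'energy', 'power',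
--                   'pressure', 'temperature', 'frequency', 'wavelength', 'amplitude',
--                   'resistance', 'current', 'voltage', 'capacitance', 'inductance',
--                   'radius', 'volume', 'mass', 'weight', 'density', 'enthalpy',
--                   'entropy', 'concentration', 'molarity', 'ph', 'constant',
--                   'rate', 'efficiency', 'ratio', 'proportion', 'factor')
--
-- ENTITY_WORDS = ('cell', 'tissue', 'organ', 'organism', 'molecule', 'atom', 'ion',
--                 'compound', 'element', 'bond', 'hormone', 'enzyme', 'protein',
--                 'nucleic', 'vitamin', 'bacteria', 'virus', 'fungi', 'algae',
--                 'family', 'group', 'kingdom', 'species', 'genus', 'metal', 'nonmetal')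
--
-- STRUCTURE_WORDS = ('structure', 'anatomy', 'morphology', 'configuration', 'shape',
--                    'geometry', 'isomerism', 'stereochemistry')
--
-- CLASSIFY_WORDS = ('classification', 'types', 'kinds', 'categories', 'varieties')
--
-- SUBJECT_VERBS = {
--     'physics':      ['analyse', 'derive', 'calculate', 'explain', 'apply'],
--     'chemistry':    ['identify', 'explain', 'predict', 'write', 'apply'],
--     'biology':      ['describe', 'identify', 'compare', 'explain', 'diagram'],
--     'maths-higher': ['prove', 'solve', 'evaluate', 'apply', 'verify'],
-- }
--
-- # One flat keyword index: every keyword tagged with the priority of its category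
-- # (0 = theorem ... 5 = classify).
-- KEYWORD_CATEGORY = tuple(
--     (w, cat)
--     for cat, group in enumerate((THEOREM_WORDS, PROCESS_WORDS, QUANTITY_WORDS,
--                                  ENTITY_WORDS, STRUCTURE_WORDS, CLASSIFY_WORDS))
--     for w in group
-- )
--
--
-- def _category_verb(cat: int, subject: str) -> str:
--     if cat == 0:
--         return 'state and apply' if subject != 'biology' else 'state'
--     if cat == 1:
--         return 'describe' if subject == 'biology' else 'explain'
--     if cat == 2:
--         return 'calculate' if subject in ('physics', 'chemistry') else 'evaluate'
--     if cat == 3: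
--         return 'identify'
--     if cat == 4:
--         return 'draw and explain' if subject == 'biology' else 'describe'
--     return 'classify'
--
--
-- def pick_verb(sub: str, subject: str, idx: int) -> str:
--     """Choose a grammatical verb for the given subtopic."""
--     s = sub.lower()
--     # Single pass over the flat keyword index, accumulating the best (minimum)
--     # matching category priority; no per-category staged scans.
--     best = None
--     for w, cat in KEYWORD_CATEGORY:
--         if w in s:
--             best = cat if best is None else min(best, cat)
--     if best is not None:
--         return _category_verb(best, subject)
--     verbs = SUBJECT_VERBS[subject]
--     return verbs[idx % len(verbs)]
-- ===== Notes on version B (the rewrite author's own statement) =====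
-- stated objective: alternative
-- what changed: Instead of six staged per-category scans with early exit, B makes one pass over a single flat (keyword, priority) index accumulating the minimum matching category priority, then maps that priority (with the subject) to the verb; the fallback cycling lookup is unchanged.
-- outside the precondition, e.g. on pick_verb('misc topic', 'history', 0): A raises KeyError, B raises KeyError
import Mathlib
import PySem

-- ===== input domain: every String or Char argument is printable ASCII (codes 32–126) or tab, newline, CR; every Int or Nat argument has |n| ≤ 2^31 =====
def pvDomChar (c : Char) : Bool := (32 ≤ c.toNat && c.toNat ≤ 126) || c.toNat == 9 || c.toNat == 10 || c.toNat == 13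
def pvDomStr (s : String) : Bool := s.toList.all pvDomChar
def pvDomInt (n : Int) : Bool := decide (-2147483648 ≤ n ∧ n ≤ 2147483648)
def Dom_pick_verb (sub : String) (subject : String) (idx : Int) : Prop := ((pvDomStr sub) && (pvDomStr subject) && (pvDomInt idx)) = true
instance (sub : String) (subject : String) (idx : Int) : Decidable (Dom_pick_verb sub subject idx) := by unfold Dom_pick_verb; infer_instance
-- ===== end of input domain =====

-- B replaces A's six staged per-category keyword scans (early exit at the first matching
-- category) by one pass over a flat (keyword, priority) index accumulating the minimum
-- matching priority, then mapping that priority to the verb: a different traversal, same cost.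


-- module-level constants shared by both Python versions
def theoremWords : List String := ["theorem", "law", "principle", "rule", "postulate", "axiom", "equation"]
def processWords : List String := ["reaction", "synthesis", "preparation", "process", "cycle", "pathway",
  "replication", "transcription", "translation", "respiration", "photosynthesis", "digestion",
  "circulation", "excretion", "fermentation", "hydrolysis", "metabolism", "mitosis", "meiosis"]
def quantityWords : List String := ["velocity", "acceleration", "momentum", "force", "energy", "power",
  "pressure", "temperature", "frequency", "wavelength", "amplitude", "resistance", "current",
  "voltage", "capacitance", "inductance", "radius", "volume", "mass", "weight", "density",
  "enthalpy", "entropy", "concentration", "molarity", "ph", "constant", "rate", "efficiency",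
  "ratio", "proportion", "factor"]
def entityWords : List String := ["cell", "tissue", "organ", "organism", "molecule", "atom", "ion",
  "compound", "element", "bond", "hormone", "enzyme", "protein", "nucleic", "vitamin", "bacteria",
  "virus", "fungi", "algae", "family", "group", "kingdom", "species", "genus", "metal", "nonmetal"]
def structureWords : List String := ["structure", "anatomy", "morphology", "configuration", "shape",
  "geometry", "isomerism", "stereochemistry"]
def classifyWords : List String := ["classification", "types", "kinds", "categories", "varieties"]

def subjectVerbs : PySem.Dict String (List String) := PySem.Dict.ofList
  [("physics", ["analyse", "derive", "calculate", "explain", "apply"]),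
   ("chemistry", ["identify", "explain", "predict", "write", "apply"]),
   ("biology", ["describe", "identify", "compare", "explain", "diagram"]),
   ("maths-higher", ["prove", "solve", "evaluate", "apply", "verify"])]

-- the shared fallback 'SUBJECT_VERBS[subject][idx % len(...)]'; "" marks the KeyError case (outside Pre_)
def fallbackVerb (subject : String) (idx : Int) : String :=
  match subjectVerbs.get? subject with
  | some vs => PySem.List.pyGetD vs (PySem.Int.mod idx (vs.length : Int)) ""
  | none => ""

-- ===== PORT A =====
def pick_verb (sub : String) (subject : String) (idx : Int) : String :=
  let s := PySem.Str.lower sub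
  if theoremWords.any (fun w => PySem.Str.isIn w s) then
    (if subject ≠ "biology" then "state and apply" else "state")
  else if processWords.any (fun w => PySem.Str.isIn w s) then
    (if subject = "biology" then "describe" else "explain")
  else if quantityWords.any (fun w => PySem.Str.isIn w s) then
    (if subject = "physics" ∨ subject = "chemistry" then "calculate" else "evaluate")
  else if entityWords.any (fun w => PySem.Str.isIn w s) then "identify"
  else if structureWords.any (fun w => PySem.Str.isIn w s) then
    (if subject = "biology" then "draw and explain" else "describe")
  else if classifyWords.any (fun w => PySem.Str.isIn w s) then "classify"
  else fallbackVerb subject idx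

-- ===== PORT B =====
-- the flat KEYWORD_CATEGORY index of Source B: every keyword tagged with its category priority
def flatKeywords : List (String × Nat) :=
  theoremWords.map (fun w => (w, 0)) ++ processWords.map (fun w => (w, 1)) ++
  quantityWords.map (fun w => (w, 2)) ++ entityWords.map (fun w => (w, 3)) ++
  structureWords.map (fun w => (w, 4)) ++ classifyWords.map (fun w => (w, 5))

-- 'best = cat if best is None else min(best, cat)'
def bestStep (s : String) (best : Option Nat) (p : String × Nat) : Option Nat :=
  if PySem.Str.isIn p.1 s then
    some (match best with | none => p.2 | some b => min b p.2)
  else best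

-- '_category_verb(cat, subject)' of Source B
def categoryVerb (cat : Nat) (subject : String) : String :=
  if cat = 0 then (if subject ≠ "biology" then "state and apply" else "state")
  else if cat = 1 then (if subject = "biology" then "describe" else "explain")
  else if cat = 2 then (if subject = "physics" ∨ subject = "chemistry" then "calculate" else "evaluate")
  else if cat = 3 then "identify"
  else if cat = 4 then (if subject = "biology" then "draw and explain" else "describe")
  else "classify"

def pick_verb_alt (sub : String) (subject : String) (idx : Int) : String :=
  let s := PySem.Str.lower sub
  match flatKeywords.foldl (bestStep s) none with
  | some cat => categoryVerb cat subject
  | none =>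
      match subjectVerbs.get? subject with
      | some vs => PySem.List.pyGetD vs (PySem.Int.mod idx (vs.length : Int)) ""
      | none => ""

-- ===== PRECONDITION & SPEC =====
-- Pre_ excludes exactly the inputs where A raises KeyError: no keyword matches and the
-- subject is not one of the four keys of SUBJECT_VERBS.
def Pre_pick_verb (sub : String) (subject : String) (idx : Int) : Prop :=
  subject = "physics" ∨ subject = "chemistry" ∨ subject = "biology" ∨ subject = "maths-higher" ∨
  (theoremWords ++ processWords ++ quantityWords ++ entityWords ++ structureWords ++ classifyWords).any
    (fun w => PySem.Str.isIn w (PySem.Str.lower sub)) = true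
instance (sub : String) (subject : String) (idx : Int) : Decidable (Pre_pick_verb sub subject idx) := by
  unfold Pre_pick_verb; infer_instance

def pvWitness_pick_verb : String × String × Int := ("Newton's Laws of Motion", "physics", 3)

def Spec_pick_verb (sub : String) (subject : String) (idx : Int) (out : String) : Prop := out = pick_verb_alt sub subject idx
instance (sub : String) (subject : String) (idx : Int) (out : String) : Decidable (Spec_pick_verb sub subject idx out) := by unfold Spec_pick_verb; infer_instance

-- ===== CLAIM (what is proved, stated in full; the proofs are below) =====
def Claim_equal_pick_verb : Prop := ∀ (sub : String) (subject : String) (idx : Int), Dom_pick_verb sub subject idx → Pre_pick_verb sub subject idx → Spec_pick_verb sub subject idx (pick_verb sub subject idx)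

-- ===== LEMMAS AND PROOFS =====
-- folding bestStep over one category's segment of the flat index either leaves the
-- accumulator alone (no keyword matches) or records min(acc, i)
theorem fold_group (s : String) (i : Nat) (ws : List String) (acc : Option Nat) :
    List.foldl (bestStep s) acc (ws.map (fun w => (w, i))) =
      if ws.any (fun w => PySem.Str.isIn w s) then
        some (match acc with | none => i | some b => min b i)
      else acc := by
  induction ws generalizing acc with
  | nil => simp
  | cons w rest ih =>
      simp only [List.map_cons, List.foldl_cons, List.any_cons, bestStep]
      by_cases h : PySem.Str.isIn w s = true
      · rw [if_pos h, ih]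
        simp only [h, Bool.true_or]
        rw [if_pos trivial]
        by_cases hr : (rest.any fun w => PySem.Str.isIn w s) = true
        · rw [if_pos hr]
          cases acc with
          | none => exact congrArg some (Nat.min_self i)
          | some b => exact congrArg some (by rw [Nat.min_assoc, Nat.min_self])
        · rw [if_neg hr]
      · have h' : PySem.Str.isIn w s = false := by
          revert h; cases PySem.Str.isIn w s <;> simp
        rw [if_neg h, ih]
        simp only [h', Bool.false_or]

-- ===== VERDICT (by name: the statement is the Claim_ definition above) =====
set_option maxHeartbeats 2000000 in
theorem pick_verb_spec : Claim_equal_pick_verb := by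
  intro sub subject idx _hDom _hPre
  unfold Spec_pick_verb pick_verb pick_verb_alt fallbackVerb
  simp only [flatKeywords, List.foldl_append, fold_group]
  split_ifs <;> simp_all [categoryVerb]
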